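-- pv_equiv track=rewrite | github.com/SICROMONOCO/SMO | tui/widgets/network.py | _get_ip_address
-- ===== SOURCE A (Python) =====
-- def _get_ip_address(addresses: list) -> tuple:
--     """Extract IPv4 and MAC addresses from address list."""
--     ipv4 = None
--     mac = None
--     for addr in addresses:
--         family = addr.get("family")
--         address = addr.get("address", "")
--         if family == "2":  # IPv4
--             ipv4 = address
--         elif family == "-1":  # MAC/Link
--             mac = address
--     return (ipv4, mac)
-- ===== SOURCE B (Python) =====
-- def _get_ip_address(addresses: list) -> tuple:
--     """Extract IPv4 and MAC addresses from address list.
--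
--     Scans the list in reverse, records the first hit for each slot
--     (= last occurrence in original order) and stops once both are found.
--     """
--     ipv4 = None
--     mac = None
--     for addr in reversed(addresses):
--         family = addr.get("family")
--         if family == "2":  # IPv4
--             if ipv4 is None:
--                 ipv4 = addr.get("address", "")
--         elif family == "-1":  # MAC/Link
--             if mac is None:
--                 mac = addr.get("address", "")
--         if ipv4 is not None and mac is not None:
--             break
--     return (ipv4, mac)
-- ===== Notes on version B (the rewrite author's own statement) =====
-- stated objective: alternative
-- what changed: B traverses the list in reverse, assigns each slot only on its first (reverse-order) hit instead of overwriting forward, and breaks early once both IPv4 and MAC are found.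
import Mathlib
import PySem

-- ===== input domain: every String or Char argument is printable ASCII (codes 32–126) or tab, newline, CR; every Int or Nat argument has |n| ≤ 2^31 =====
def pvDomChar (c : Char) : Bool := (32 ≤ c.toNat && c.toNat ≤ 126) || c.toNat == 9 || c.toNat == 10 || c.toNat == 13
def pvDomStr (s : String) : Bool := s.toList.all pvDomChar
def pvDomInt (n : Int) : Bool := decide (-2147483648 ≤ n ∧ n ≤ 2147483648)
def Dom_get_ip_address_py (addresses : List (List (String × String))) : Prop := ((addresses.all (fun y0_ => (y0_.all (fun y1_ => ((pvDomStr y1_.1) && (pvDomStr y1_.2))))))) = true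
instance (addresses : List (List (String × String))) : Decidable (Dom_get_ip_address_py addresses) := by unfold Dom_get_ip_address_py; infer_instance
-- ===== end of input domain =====

-- B replaces A's forward overwrite-scan by a reverse traversal that sets each slot once and exits
-- early when both IPv4 and MAC are found (objective: alternative decomposition, same cost).


-- ===== PORT A =====
-- dict.get("family") / dict.get("address", "") on an association list: first match
def pvFam (addr : List (String × String)) : Option String :=
  (addr.find? (fun kv => kv.1 == "family")).map (·.2)

def pvAddr (addr : List (String × String)) : String :=
  ((addr.find? (fun kv => kv.1 == "address")).map (·.2)).getD ""

def pvStepA (st : Option String × Option String) (addr : List (String × String)) :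
    Option String × Option String :=
  let family := pvFam addr
  let address := pvAddr addr
  if family == some "2" then (some address, st.2)
  else if family == some "-1" then (st.1, some address)
  else st

def get_ip_address_py (addresses : List (List (String × String))) : Option String × Option String :=
  addresses.foldl pvStepA (none, none)

-- ===== PORT B =====
-- reverse scan with first-hit assignment and early exit
def pvGoB : List (List (String × String)) → Option String → Option String →
    Option String × Option String
  | [], ipv4, mac => (ipv4, mac)
  | addr :: rest, ipv4, mac =>
    let family := pvFam addr
    let st :=
      if family == some "2" then
        (if ipv4 = none then (some (pvAddr addr), mac) else (ipv4, mac))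
      else if family == some "-1" then
        (if mac = none then (ipv4, some (pvAddr addr)) else (ipv4, mac))
      else (ipv4, mac)
    if st.1.isSome && st.2.isSome then st else pvGoB rest st.1 st.2

def get_ip_address_py_alt (addresses : List (List (String × String))) :
    Option String × Option String :=
  pvGoB addresses.reverse none none

-- ===== PRECONDITION & SPEC =====
def Spec_get_ip_address_py (addresses : List (List (String × String))) (out : Option String × Option String) : Prop := out = get_ip_address_py_alt addresses
instance (addresses : List (List (String × String))) (out : Option String × Option String) : Decidable (Spec_get_ip_address_py addresses out) := by unfold Spec_get_ip_address_py; infer_instance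

-- ===== CLAIM (what is proved, stated in full; the proofs are below) =====
def Claim_equal_get_ip_address_py : Prop := ∀ (addresses : List (List (String × String))), Dom_get_ip_address_py addresses → Spec_get_ip_address_py addresses (get_ip_address_py addresses)

-- ===== LEMMAS AND PROOFS =====
-- last IPv4 / MAC entry of l, seen as the first match of the reversed list
def pvFindIP (l : List (List (String × String))) : Option String :=
  (l.find? (fun a => pvFam a == some "2")).map pvAddr

def pvFindMac (l : List (List (String × String))) : Option String :=
  (l.find? (fun a => pvFam a == some "-1")).map pvAddr

theorem pvFoldA_eq (l : List (List (String × String))) :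
    ∀ i m, l.foldl pvStepA (i, m) =
      ((pvFindIP l.reverse).or i, (pvFindMac l.reverse).or m) := by
  induction l with
  | nil => intro i m; simp [pvFindIP, pvFindMac]
  | cons a l ih =>
    intro i m
    simp only [List.foldl_cons, List.reverse_cons]
    by_cases h2 : pvFam a == some "2"
    · have h1 : ¬ (pvFam a == some "-1") := by
        simp_all
      rw [show pvStepA (i, m) a = (some (pvAddr a), m) by
        simp [pvStepA, h2]]
      rw [ih]
      simp [pvFindIP, pvFindMac, List.find?_append, h2, h1]
    · by_cases h1 : pvFam a == some "-1"
      · rw [show pvStepA (i, m) a = (i, some (pvAddr a)) by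
          simp [pvStepA, h2, h1]]
        rw [ih]
        simp [pvFindIP, pvFindMac, List.find?_append, h2, h1]
      · rw [show pvStepA (i, m) a = (i, m) by simp [pvStepA, h2, h1]]
        rw [ih]
        simp [pvFindIP, pvFindMac, List.find?_append, h2, h1]

theorem pvGoB_eq (l : List (List (String × String))) :
    ∀ i m, pvGoB l i m = (i.or (pvFindIP l), m.or (pvFindMac l)) := by
  induction l with
  | nil => intro i m; simp [pvGoB, pvFindIP, pvFindMac]
  | cons a l ih =>
    intro i m
    by_cases h2 : pvFam a == some "2"
    · have h1 : ¬ (pvFam a == some "-1") := by simp_all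
      have hip : pvFindIP (a :: l) = some (pvAddr a) := by
        simp [pvFindIP, h2]
      have hmac : pvFindMac (a :: l) = pvFindMac l := by
        simp [pvFindMac, h1]
      cases i with
      | none =>
        simp only [pvGoB, h2, if_true]
        cases m with
        | none => simp [ih, hip, hmac]
        | some mv => simp [hip, hmac]
      | some iv =>
        simp only [pvGoB, h2, if_true]
        cases m with
        | none => simp [ih, hip, hmac]
        | some mv => simp [hip, hmac]
    · by_cases h1 : pvFam a == some "-1"
      · have hip : pvFindIP (a :: l) = pvFindIP l := by
          simp [pvFindIP, h2]
        have hmac : pvFindMac (a :: l) = some (pvAddr a) := by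
          simp [pvFindMac, h1]
        cases m with
        | none =>
          simp only [pvGoB, h2, h1]
          cases i with
          | none => simp [ih, hip, hmac]
          | some iv => simp [hip, hmac]
        | some mv =>
          simp only [pvGoB, h2, h1]
          cases i with
          | none => simp [ih, hip, hmac]
          | some iv => simp [hip, hmac]
      · have hip : pvFindIP (a :: l) = pvFindIP l := by
          simp [pvFindIP, h2]
        have hmac : pvFindMac (a :: l) = pvFindMac l := by
          simp [pvFindMac, h1]
        cases i with
        | none => simp [pvGoB, h2, h1, ih, hip, hmac]
        | some iv =>
          cases m with
          | none => simp [pvGoB, h2, h1, ih, hip, hmac]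
          | some mv => simp [pvGoB, h2, h1, hip, hmac]

-- ===== VERDICT (by name: the statement is the Claim_ definition above) =====
theorem get_ip_address_py_spec : Claim_equal_get_ip_address_py := by
  intro addresses _
  unfold Spec_get_ip_address_py get_ip_address_py get_ip_address_py_alt
  rw [pvFoldA_eq, pvGoB_eq]
  simp
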